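-- pv_equiv track=rewrite | github.com/opencomputeproject/Time-Appliance-Project | Incubation/Software/WiWi/SDR/V3/WiWi_SDR/ClockmatrixTools/renesas_cm_registers.py | hex_to_signed_nbit
-- ===== SOURCE A (Python) =====
-- def hex_to_signed_nbit(hex_value, n_bits):
--     """
--     Convert a hexadecimal string value assumed to be an n-bit signed integer
--     to its decimal equivalent.
--
--     :param hex_value: String representing a hexadecimal number
--     :param n_bits: The bit size of the signed integer
--     :return: Decimal equivalent of the n-bit signed integer
--     """
--     # Convert to binary (full length)
--     full_binary = bin(int(hex_value, 16))[2:].zfill(n_bits)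
--
--     # Extracting the relevant bits (considering n_bits)
--     binary_n_bit = full_binary[-n_bits:]
--
--     # Check if negative (if MSB is 1)
--     is_negative = binary_n_bit[0] == '1'
--
--     # Function to calculate two's complement for negative numbers
--     def twos_complement(binary_str):
--         # Invert the bits
--         inverted = ''.join('1' if b == '0' else '0' for b in binary_str)
--         # Add 1
--         decimal = int(inverted, 2) + 1
--         return -decimal
--
--     # Convert to decimal
--     if is_negative:
--         return twos_complement(binary_n_bit)
--     else:
--         return int(binary_n_bit, 2)
-- ===== SOURCE B (Python) =====
-- def hex_to_signed_nbit(hex_value, n_bits):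
--     """
--     Convert a hexadecimal string value assumed to be an n-bit signed integer
--     to its decimal equivalent, by integer bit arithmetic instead of binary
--     string manipulation.
--     """
--     v = int(hex_value, 16) & ((1 << n_bits) - 1)
--     if v >> (n_bits - 1):
--         return v - (1 << n_bits)
--     return v
-- ===== Notes on version B (the rewrite author's own statement) =====
-- stated objective: idiomatic
-- what changed: Replaces A's binary-string pipeline (bin/zfill, negative slicing, per-character Python-level inversion and a second int(...,2) parse) with direct integer bit arithmetic: mask the parsed value to n_bits and subtract 1<<n_bits when the sign bit is set. Pre_ excludes unparseable hex (both raise ValueError), n_bits < 1 (A indexes/slices a degenerate string or raises, B's shifts raise), and negative hex values, an unspecified corner outside the docstring's contract where A slices into bin()'s '-0b' prefix.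
-- outside the precondition, e.g. on hex_to_signed_nbit('-5', 3): A returns -3, B returns 3; on hex_to_signed_nbit('5', 0): A returns -3, B raises ValueError; on hex_to_signed_nbit('5', -1): A returns 1, B raises ValueError
import Mathlib
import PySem

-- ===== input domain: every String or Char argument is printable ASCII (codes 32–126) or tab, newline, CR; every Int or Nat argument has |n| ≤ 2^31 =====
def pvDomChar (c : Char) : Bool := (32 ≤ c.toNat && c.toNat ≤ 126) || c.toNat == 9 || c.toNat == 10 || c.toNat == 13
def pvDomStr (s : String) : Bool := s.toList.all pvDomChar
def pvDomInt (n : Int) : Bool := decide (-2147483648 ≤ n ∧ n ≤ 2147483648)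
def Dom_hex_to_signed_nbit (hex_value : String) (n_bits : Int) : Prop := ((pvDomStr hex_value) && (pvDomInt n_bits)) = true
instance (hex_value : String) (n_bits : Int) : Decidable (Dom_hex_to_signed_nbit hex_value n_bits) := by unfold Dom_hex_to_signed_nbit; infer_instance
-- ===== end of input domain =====

-- B replaces A's binary-string pipeline (bin/zfill/slice/char-inversion/int(.,2)) with plain
-- integer bit arithmetic (mask, sign-bit test, subtract 2^n) — idiomatic, not claimed faster.

-- ===== PORT A =====
def pvBit (c : Char) : Nat := if c = '1' then 1 else 0

def pvBinVal (cs : List Char) : Nat := cs.foldl (fun a c => 2 * a + pvBit c) 0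

def pvIsBin (cs : List Char) : Bool := !cs.isEmpty && cs.all (fun c => c = '0' || c = '1')

-- Hand port of Python's int(s, 2), exact for strings over the alphabet {'0','1','b'} — the only
-- strings A ever builds (bin()[2:] then zfill/slice/inversion): an optional "0b" prefix, then a
-- nonempty run of binary digits; anything else (empty, stray 'b') is a ValueError (= none).
-- (PySem.Int.ofCharsBase? computes the same values but its digit loop is private, so no inductive
-- lemma about it can be stated; this explicit form is what the equivalence proof reasons about.)
def pvIntBase2? (cs : List Char) : Option Int :=
  let ds := if cs.take 2 = ['0', 'b'] then cs.drop 2 else cs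
  if pvIsBin ds then some ((pvBinVal ds : Nat) : Int) else none

def hex_to_signed_nbit (hex_value : String) (n_bits : Int) : Int :=
  match PySem.Int.ofStrBase? hex_value 16 with
  | none => 0  -- int(hex_value, 16) raises ValueError; excluded by Pre_
  | some v =>
    -- full_binary = bin(int(hex_value, 16))[2:].zfill(n_bits)
    let full_binary := PySem.Chars.zfill (PySem.List.slice (PySem.Int.toBinChars0b v) (some 2) none) n_bits
    -- binary_n_bit = full_binary[-n_bits:]
    let binary_n_bit := PySem.List.slice full_binary (some (-n_bits)) none
    -- is_negative = binary_n_bit[0] == '1'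
    match PySem.List.pyGet? binary_n_bit 0 with
    | none => 0  -- IndexError on the empty string; excluded by Pre_
    | some c =>
      if c = '1' then
        -- twos_complement: invert the bits, parse base 2, add 1, negate
        let inverted := binary_n_bit.map (fun b => if b = '0' then '1' else '0')
        match pvIntBase2? inverted with
        | none => 0  -- ValueError; unreachable under Pre_
        | some d => -(d + 1)
      else
        match pvIntBase2? binary_n_bit with
        | none => 0  -- ValueError; unreachable under Pre_
        | some d => d

-- ===== PORT B =====
def hex_to_signed_nbit_alt (hex_value : String) (n_bits : Int) : Int :=
  match PySem.Int.ofStrBase? hex_value 16 with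
  | none => 0  -- int(hex_value, 16) raises ValueError; excluded by Pre_
  | some v0 =>
    if n_bits ≤ 0 then 0  -- 1 << n_bits (n<0) or v >> (n_bits-1) (n=0) raises ValueError; excluded by Pre_
    else
      let v := PySem.Int.band v0 ((1 : Int) <<< n_bits.toNat - 1)
      if v >>> (n_bits - 1).toNat ≠ 0 then v - (1 : Int) <<< n_bits.toNat
      else v

-- ===== PRECONDITION & SPEC =====
-- Pre_ excludes inputs where int(hex_value, 16) raises ValueError, non-positive n_bits (A hits an
-- IndexError or returns a whole-string accident at n_bits ≤ 0; B's shifts raise ValueError), and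
-- hex strings denoting NEGATIVE numbers: a negative value is outside the function's stated contract
-- ("hex string assumed to be an n-bit signed integer"); there A slices into the '-0b' prefix of
-- bin(), usually raising ValueError, and no specification covers the corner, so neither A's nor
-- B's value there is the one to match.
def Pre_hex_to_signed_nbit (hex_value : String) (n_bits : Int) : Prop :=
  (PySem.Int.ofStrBase? hex_value 16).isSome = true ∧
  0 ≤ (PySem.Int.ofStrBase? hex_value 16).getD (-1) ∧
  1 ≤ n_bits

instance (hex_value : String) (n_bits : Int) : Decidable (Pre_hex_to_signed_nbit hex_value n_bits) := by
  unfold Pre_hex_to_signed_nbit; infer_instance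

def pvWitness_hex_to_signed_nbit : String × Int := ("8f", 8)

def Spec_hex_to_signed_nbit (hex_value : String) (n_bits : Int) (out : Int) : Prop := out = hex_to_signed_nbit_alt hex_value n_bits
instance (hex_value : String) (n_bits : Int) (out : Int) : Decidable (Spec_hex_to_signed_nbit hex_value n_bits out) := by unfold Spec_hex_to_signed_nbit; infer_instance

-- ===== CLAIM (what is proved, stated in full; the proofs are below) =====
def Claim_equal_hex_to_signed_nbit : Prop := ∀ (hex_value : String) (n_bits : Int), Dom_hex_to_signed_nbit hex_value n_bits → Pre_hex_to_signed_nbit hex_value n_bits → Spec_hex_to_signed_nbit hex_value n_bits (hex_to_signed_nbit hex_value n_bits)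

-- ===== LEMMAS AND PROOFS =====

-- msb-first binary representation of a natural number, the shape Nat.toDigits 2 produces
def pvBinRep (n : Nat) : List Char :=
  if _h : n < 2 then [if n = 1 then '1' else '0']
  else pvBinRep (n / 2) ++ [if n % 2 = 1 then '1' else '0']
  decreasing_by exact Nat.div_lt_self (by omega) (by omega)

def pvAllBits (cs : List Char) : Prop := ∀ c ∈ cs, c = '0' ∨ c = '1'

theorem pvBinVal_foldl (cs : List Char) (a : Nat) :
    cs.foldl (fun a c => 2 * a + pvBit c) a = a * 2 ^ cs.length + pvBinVal cs := by
  induction cs generalizing a with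
  | nil => simp [pvBinVal]
  | cons c cs ih =>
    simp only [List.foldl_cons, List.length_cons, pvBinVal]
    rw [ih, ih (2 * 0 + pvBit c)]
    ring

theorem pvBinVal_append (cs ds : List Char) :
    pvBinVal (cs ++ ds) = pvBinVal cs * 2 ^ ds.length + pvBinVal ds := by
  unfold pvBinVal
  rw [List.foldl_append, pvBinVal_foldl]
  rfl

theorem pvBinVal_cons (c : Char) (cs : List Char) :
    pvBinVal (c :: cs) = pvBit c * 2 ^ cs.length + pvBinVal cs := by
  simpa [pvBinVal, pvBit] using pvBinVal_append [c] cs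

theorem pvBinVal_lt (cs : List Char) (h : pvAllBits cs) : pvBinVal cs < 2 ^ cs.length := by
  induction cs with
  | nil => simp [pvBinVal]
  | cons c cs ih =>
    have hc := h c (by simp)
    have ih' := ih (fun d hd => h d (by simp [hd]))
    rw [pvBinVal_cons]
    have : pvBit c ≤ 1 := by rcases hc with h | h <;> simp [pvBit, h]
    simp only [List.length_cons, pow_succ]
    nlinarith

theorem pvBinVal_replicate_zero (k : Nat) : pvBinVal (List.replicate k '0') = 0 := by
  induction k with
  | zero => simp [pvBinVal]
  | succ k ih => rw [List.replicate_succ, pvBinVal_cons, ih]; simp [pvBit]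

theorem pvBinRep_allBits (n : Nat) : pvAllBits (pvBinRep n) := by
  induction n using Nat.strong_induction_on with
  | _ n ih =>
    rw [pvBinRep]
    by_cases h : n < 2
    · rw [dif_pos h]
      intro c hc; simp at hc; subst hc
      by_cases h1 : n = 1 <;> simp [h1]
    · rw [dif_neg h]
      intro c hc
      rw [List.mem_append] at hc
      rcases hc with hc | hc
      · exact ih (n / 2) (Nat.div_lt_self (by omega) (by omega)) c hc
      · simp at hc; subst hc
        by_cases h1 : n % 2 = 1 <;> simp [h1]

theorem pvBinRep_val (n : Nat) : pvBinVal (pvBinRep n) = n := by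
  induction n using Nat.strong_induction_on with
  | _ n ih =>
    rw [pvBinRep]
    by_cases h : n < 2
    · rw [dif_pos h]
      interval_cases n <;> decide
    · rw [dif_neg h]
      rw [pvBinVal_append, ih (n / 2) (Nat.div_lt_self (by omega) (by omega))]
      have h2 : pvBinVal [if n % 2 = 1 then '1' else '0'] = n % 2 := by
        have := Nat.mod_lt n (show 0 < 2 by omega)
        interval_cases h : n % 2 <;> decide
      rw [h2]
      simp
      omega

theorem pvBinRep_ne_nil (n : Nat) : pvBinRep n ≠ [] := by
  rw [pvBinRep]; split_ifs <;> simp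

theorem pvToDigitsCore_two (f : Nat) : ∀ (n : Nat) (ds : List Char), n < f →
    Nat.toDigitsCore 2 f n ds = pvBinRep n ++ ds := by
  induction f with
  | zero => intro n ds h; omega
  | succ f ih =>
    intro n ds h
    rw [Nat.toDigitsCore]
    by_cases h2 : n / 2 = 0
    · simp only [h2, if_true]
      rw [pvBinRep]
      have hn : n < 2 := by omega
      simp only [hn, dif_pos]
      have : (n % 2).digitChar = (if n = 1 then '1' else '0') := by
        interval_cases n <;> decide
      rw [this]
      rfl
    · simp only [h2, if_false]
      rw [ih (n / 2) _ (by omega)]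
      conv_rhs => rw [pvBinRep]
      have hn : ¬ n < 2 := by omega
      rw [dif_neg hn]
      have : (n % 2).digitChar = (if n % 2 = 1 then '1' else '0') := by
        have := Nat.mod_lt n (show 0 < 2 by omega)
        interval_cases h : n % 2 <;> decide
      rw [this]
      simp

theorem pvToDigits_two (n : Nat) : Nat.toDigits 2 n = pvBinRep n :=
  pvToDigitsCore_two (n + 1) n [] (by omega) |>.trans (by simp)

theorem pvBinVal_invert (cs : List Char) (h : pvAllBits cs) :
    pvBinVal (cs.map (fun b => if b = '0' then '1' else '0')) = 2 ^ cs.length - 1 - pvBinVal cs := by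
  induction cs with
  | nil => simp [pvBinVal]
  | cons c cs ih =>
    have hc := h c (by simp)
    have ih' := ih (fun d hd => h d (by simp [hd]))
    have hlt : pvBinVal cs < 2 ^ cs.length := pvBinVal_lt cs (fun d hd => h d (by simp [hd]))
    simp only [List.map_cons]
    rw [pvBinVal_cons, ih', pvBinVal_cons]
    simp only [List.length_map, List.length_cons, pow_succ]
    rcases hc with h | h <;> subst h <;> simp [pvBit] <;> omega

theorem pvIntBase2?_of_bits (cs : List Char) (h : pvAllBits cs) (hne : cs ≠ []) :
    pvIntBase2? cs = some ((pvBinVal cs : Nat) : Int) := by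
  unfold pvIntBase2?
  have htake : ¬ cs.take 2 = ['0', 'b'] := by
    intro hc
    have : 'b' ∈ cs.take 2 := by rw [hc]; simp
    have hb : 'b' ∈ cs := List.mem_of_mem_take this
    rcases h 'b' hb with h1 | h1 <;> simp at h1
  have hbin : pvIsBin cs = true := by
    unfold pvIsBin
    simp [hne, List.all_eq_true]
    intro c hc
    rcases h c hc with h1 | h1 <;> simp [h1]
  simp [htake, hbin]

theorem pvZfill_bits (cs : List Char) (N : Nat) (hb : pvAllBits cs) (hne : cs ≠ []) :
    PySem.Chars.zfill cs ((N : Nat) : Int) = List.replicate (N - cs.length) '0' ++ cs := by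
  obtain ⟨c, rest, rfl⟩ := List.exists_cons_of_ne_nil hne
  have hc := hb c (by simp)
  unfold PySem.Chars.zfill
  by_cases h : ((N : Nat) : Int) ≤ ((c :: rest).length : Int)
  · rw [if_pos h]
    have h0 : N - (c :: rest).length = 0 := by
      have : (N : Int) ≤ (c :: rest).length := h
      omega
    rw [h0]
    simp
  · rw [if_neg h]
    have hcs : ¬ (c = '+' ∨ c = '-') := by rcases hc with h1 | h1 <;> simp [h1]
    simp only [hcs, if_false]
    simp

-- ===== VERDICT (by name: the statement is the Claim_ definition above) =====
theorem hex_to_signed_nbit_spec : Claim_equal_hex_to_signed_nbit := by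
  intro hex n _dom hpre
  obtain ⟨hs, hnn0, hn1⟩ := hpre
  unfold Spec_hex_to_signed_nbit
  obtain ⟨v, hv⟩ := Option.isSome_iff_exists.mp hs
  rw [hv] at hnn0
  simp only [Option.getD_some] at hnn0
  unfold hex_to_signed_nbit hex_to_signed_nbit_alt
  rw [hv]
  simp only []
  set N := n.toNat with hN
  have hnN : n = (N : Int) := (Int.toNat_of_nonneg (by omega)).symm
  have hN1 : 1 ≤ N := by omega
  set m := v.toNat with hm
  have hvm : v = (m : Int) := (Int.toNat_of_nonneg hnn0).symm
  -- A side: bin(v)[2:] = pvBinRep m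
  have hslice2 : PySem.List.slice (PySem.Int.toBinChars0b v) (some 2) none = pvBinRep m := by
    rw [PySem.List.slice_from (PySem.Int.toBinChars0b v) (a := 2) (by omega)]
    unfold PySem.Int.toBinChars0b
    rw [if_neg (by omega)]
    rw [← hm, pvToDigits_two]
    rfl
  rw [hslice2]
  -- zfill
  have hfull : PySem.Chars.zfill (pvBinRep m) n
      = List.replicate (N - (pvBinRep m).length) '0' ++ pvBinRep m := by
    rw [hnN]
    exact pvZfill_bits _ N (pvBinRep_allBits m) (pvBinRep_ne_nil m)
  rw [hfull]
  set full := List.replicate (N - (pvBinRep m).length) '0' ++ pvBinRep m with hfdef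
  have hfa : pvAllBits full := by
    intro c hc
    rw [hfdef, List.mem_append] at hc
    rcases hc with hc | hc
    · left; exact (List.eq_of_mem_replicate hc)
    · exact pvBinRep_allBits m c hc
  have hfv : pvBinVal full = m := by
    rw [hfdef, pvBinVal_append, pvBinVal_replicate_zero, pvBinRep_val]
    simp
  have hfl : N ≤ full.length := by
    have hlp : 1 ≤ (pvBinRep m).length :=
      List.length_pos_iff.mpr (pvBinRep_ne_nil m)
    rw [hfdef, List.length_append, List.length_replicate]
    omega
  -- the [-n_bits:] slice
  have hbnslice : PySem.List.slice full (some (-n)) none = full.drop (full.length - N) := by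
    rw [hnN]
    exact PySem.List.slice_from_neg_natCast full (k := N) (by omega)
  rw [hbnslice]
  set bn := full.drop (full.length - N) with hbndef
  have hbl : bn.length = N := by
    rw [hbndef, List.length_drop]
    omega
  have hba : pvAllBits bn := fun c hc => hfa c (List.mem_of_mem_drop hc)
  have hbv : pvBinVal bn = m % 2 ^ N := by
    have h1 := pvBinVal_append (full.take (full.length - N)) bn
    rw [List.take_append_drop, hfv, hbl] at h1
    have h2 := pvBinVal_lt bn hba
    rw [hbl] at h2
    calc pvBinVal bn = pvBinVal bn % 2 ^ N := (Nat.mod_eq_of_lt h2).symm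
      _ = (pvBinVal bn + pvBinVal (full.take (full.length - N)) * 2 ^ N) % 2 ^ N := by
          rw [Nat.add_mul_mod_self_right]
      _ = m % 2 ^ N := by rw [Nat.add_comm, ← h1]
  -- B side normalization
  rw [if_neg (by omega)]
  have hpow1 : (1 : Nat) ≤ 2 ^ N := Nat.one_le_two_pow
  have hmask : PySem.Int.band v ((1 : Int) <<< N - 1) = ((m % 2 ^ N : Nat) : Int) := by
    rw [hvm, Int.shiftLeft_eq]
    have he : (1 : Int) * 2 ^ N - 1 = ((2 ^ N - 1 : Nat) : Int) := by push_cast [hpow1]; ring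
    rw [he, PySem.Int.band_natCast, Nat.and_two_pow_sub_one_eq_mod]
  rw [hmask]
  have hNT : (n - 1).toNat = N - 1 := by omega
  have hshift : ((m % 2 ^ N : Nat) : Int) >>> (n - 1).toNat
      = (((m % 2 ^ N) / 2 ^ (N - 1) : Nat) : Int) := by
    rw [hNT, ← Nat.shiftRight_eq_div_pow]
    simp [Int.natCast_shiftRight]
  rw [hshift]
  -- A side: the head of the n-bit slice
  have hbne : bn ≠ [] := by
    intro h; rw [h] at hbl; simp at hbl; omega
  obtain ⟨c, rest, hcr⟩ := List.exists_cons_of_ne_nil hbne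
  rw [hcr]
  have hget : PySem.List.pyGet? (c :: rest) (0 : Int) = some c := by
    simp [PySem.List.pyGet?, PySem.List.pyIdx?]
  rw [hget]
  simp only []
  have hcb := hba c (by rw [hcr]; simp)
  have hrest : pvAllBits rest := fun d hd => hba d (by rw [hcr]; simp [hd])
  have hrl : rest.length = N - 1 := by
    have h := hbl; rw [hcr] at h; simp at h; omega
  have hdecomp : pvBinVal (c :: rest) = pvBit c * 2 ^ (N - 1) + pvBinVal rest := by
    rw [pvBinVal_cons, hrl]
  have hrlt : pvBinVal rest < 2 ^ (N - 1) := by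
    have h := pvBinVal_lt rest hrest; rwa [hrl] at h
  have hbv' : pvBinVal (c :: rest) = m % 2 ^ N := by rw [← hcr, hbv]
  rcases hcb with hc | hc
  · -- c = '0': nonnegative n-bit value
    subst hc
    rw [if_neg (by decide)]
    rw [pvIntBase2?_of_bits ('0' :: rest) (hcr ▸ hba) (by simp)]
    have hz : (m % 2 ^ N) / 2 ^ (N - 1) = 0 := by
      apply Nat.div_eq_of_lt
      rw [← hbv', hdecomp]
      simp only [pvBit, if_neg (by decide : ¬ ('0' : Char) = '1')]
      omega
    rw [hz]
    rw [if_neg (by simp)]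
    rw [hbv']
  · -- c = '1': negative branch, two's complement
    subst hc
    rw [if_pos rfl]
    have hia : pvAllBits ((('1' : Char) :: rest).map (fun b => if b = '0' then '1' else '0')) := by
      intro d hd
      simp only [List.mem_map] at hd
      obtain ⟨e, _, he⟩ := hd
      by_cases h0 : e = '0' <;> simp [h0] at he <;> simp [← he]
    rw [pvIntBase2?_of_bits _ hia (by simp)]
    simp only []
    have hiv : pvBinVal ((('1' : Char) :: rest).map (fun b => if b = '0' then '1' else '0'))
        = 2 ^ N - 1 - m % 2 ^ N := by
      have h := pvBinVal_invert ('1' :: rest) (hcr ▸ hba)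
      rw [hbv'] at h
      rw [h]
      have hlen : ('1' :: rest).length = N := by rw [← hcr]; exact hbl
      rw [hlen]
    rw [hiv]
    have hge : 2 ^ (N - 1) ≤ m % 2 ^ N := by
      rw [← hbv', hdecomp]
      have hb1 : pvBit '1' = 1 := rfl
      rw [hb1]
      omega
    have hnz : (m % 2 ^ N) / 2 ^ (N - 1) ≠ 0 := by
      have := Nat.one_le_div_iff (Nat.pos_of_ne_zero (by positivity)) |>.mpr hge
      omega
    rw [if_pos (by exact_mod_cast Int.natCast_ne_zero.mpr hnz)]
    have hlt : m % 2 ^ N < 2 ^ N := Nat.mod_lt _ (by positivity)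
    rw [Int.shiftLeft_eq]
    have hcp : ((2 ^ N : Nat) : Int) = (2 : Int) ^ N := by push_cast; ring
    rw [← hcp]
    omega
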